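-- pv_equiv track=rewrite | github.com/nishan7/DSA | Data/DP/0 - 1 Variations/Minimum Subset Sum difference.py | get_subset
-- ===== SOURCE A (Python) =====
-- def get_subset(arr, n):
--     arr_sum = sum(arr)
--
--     T = []
--     for i in range(n+1):
--         row = []
--         for j in range(arr_sum+1):
--             if j == 0:
--                 row.append(True)
--             elif i == 0:
--                 row.append(False)
--             else:
--                 row.append(False)
--         T.append(row)
--
--     for i in range(1, n+1):
--         for j in range(1, arr_sum+1):
--             if arr[i-1] > j:
--                 T[i][j] = T[i-1][j]
--             else:
--                 T[i][j] = T[i-1][j] or T[i-1][j-arr[i-1]]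
--
--
--     return T[n] #  Get the whole possibly of subsets when all the items are considered
-- ===== SOURCE B (Python) =====
-- def get_subset(arr, n):
--     # Reachable-subset-sum set instead of the 2-D DP table: fold the first n
--     # elements into the set of achievable sums, then render the boolean row.
--     arr_sum = sum(arr)
--     sums = {0}
--     for x in arr[:n]:
--         sums |= {s + x for s in sums}
--     return [j in sums for j in range(arr_sum + 1)]
-- ===== Notes on version B (the rewrite author's own statement) =====
-- stated objective: simpler
-- what changed: Replaces the (n+1)x(sum+1) boolean DP table with a set of reachable subset sums folded over the first n elements, rendering the final boolean row by membership tests.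
-- outside the precondition, e.g. on get_subset([2, -1, 1], 3): A returns [True, True, True], B returns [True, True, True]; on get_subset([2, 3], 5): A raises IndexError, B returns [True, False, True, True, False, True]
import Mathlib
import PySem

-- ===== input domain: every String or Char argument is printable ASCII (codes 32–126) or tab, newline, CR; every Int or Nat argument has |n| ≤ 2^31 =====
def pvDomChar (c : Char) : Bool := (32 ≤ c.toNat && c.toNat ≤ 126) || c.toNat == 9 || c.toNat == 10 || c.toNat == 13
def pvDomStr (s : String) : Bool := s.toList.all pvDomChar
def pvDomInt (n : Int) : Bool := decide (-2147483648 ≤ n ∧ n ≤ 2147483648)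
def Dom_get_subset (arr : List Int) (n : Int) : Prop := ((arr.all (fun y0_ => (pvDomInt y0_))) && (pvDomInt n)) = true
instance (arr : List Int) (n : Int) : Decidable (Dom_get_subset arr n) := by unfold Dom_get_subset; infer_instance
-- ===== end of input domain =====

-- B replaces the 2-D boolean DP table with a fold computing the set of reachable
-- subset sums (objective: simpler); return values agree on Pre_, proved below.

-- ===== PORT A =====
-- T[i][j] (read) — exact where 0 ≤ i < len(T) and 0 ≤ j < len(T[i]), which is the
-- case on every access Pre_ admits (out-of-range access is a Python IndexError,
-- excluded by Pre_).
def pvGet2 (T : List (List Bool)) (i j : Int) : Bool :=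
  PySem.List.pyGetD (PySem.List.pyGetD T i []) j false

-- T[i][j] = v (write) — exact under the same in-range conditions.
def pvSet2 (T : List (List Bool)) (i j : Int) (v : Bool) : List (List Bool) :=
  T.set i.toNat ((PySem.List.pyGetD T i []).set j.toNat v)

def get_subset (arr : List Int) (n : Int) : List Bool :=
  let arr_sum := arr.sum
  let T : List (List Bool) :=
    (PySem.List.pyRange 0 (n+1)).foldl (fun T i =>
      let row : List Bool :=
        (PySem.List.pyRange 0 (arr_sum+1)).foldl (fun row j =>
          if j = 0 then row ++ [true]
          else if i = 0 then row ++ [false]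
          else row ++ [false]) []
      T ++ [row]) []
  let T2 :=
    (PySem.List.pyRange 1 (n+1)).foldl (fun T i =>
      (PySem.List.pyRange 1 (arr_sum+1)).foldl (fun T j =>
        if PySem.List.pyGetD arr (i-1) 0 > j then
          pvSet2 T i j (pvGet2 T (i-1) j)
        else
          pvSet2 T i j (pvGet2 T (i-1) j || pvGet2 T (i-1) (j - PySem.List.pyGetD arr (i-1) 0))) T) T
  -- return T[n] — in range whenever Pre_ holds
  PySem.List.pyGetD T2 n []

-- ===== PORT B =====
-- loop body of B: sums |= {s + x for s in sums}
def pvUpd (sums : PySem.Set Int) (x : Int) : PySem.Set Int :=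
  PySem.Set.union sums (PySem.Set.ofList (List.map (fun s => s + x) sums))

def get_subset_alt (arr : List Int) (n : Int) : List Bool :=
  let arr_sum := arr.sum
  let sums : PySem.Set Int :=
    (PySem.List.slice arr none (some n)).foldl pvUpd (PySem.Set.ofList [0])
  (PySem.List.pyRange 0 (arr_sum+1)).map (fun j => PySem.Set.contains sums j)

-- ===== PRECONDITION & SPEC =====
-- Pre_ excludes: n < 0 and (unless sum(arr) ≤ 0) n > len(arr), where A raises
-- IndexError; and lists with a negative element but positive sum, where A raises
-- IndexError on almost all of them (T[i-1][j-arr[i-1]] overflows the row) and on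
-- the remaining few A's survival is an accident of `or` short-circuiting.
def Pre_get_subset (arr : List Int) (n : Int) : Prop :=
  0 ≤ n ∧ (arr.sum ≤ 0 ∨ (n ≤ (arr.length : Int) ∧ ∀ x ∈ arr, 0 ≤ x))
instance (arr : List Int) (n : Int) : Decidable (Pre_get_subset arr n) := by
  unfold Pre_get_subset; infer_instance

def pvWitness_get_subset : List Int × Int := ([1, 2], 2)

def Spec_get_subset (arr : List Int) (n : Int) (out : List Bool) : Prop := out = get_subset_alt arr n
instance (arr : List Int) (n : Int) (out : List Bool) : Decidable (Spec_get_subset arr n out) := by unfold Spec_get_subset; infer_instance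

-- ===== CLAIM (what is proved, stated in full; the proofs are below) =====
def Claim_equal_get_subset : Prop := ∀ (arr : List Int) (n : Int), Dom_get_subset arr n → Pre_get_subset arr n → Spec_get_subset arr n (get_subset arr n)

-- ===== LEMMAS AND PROOFS =====

-- proof-only definitions
def pvRow0 (S' : Nat) : List Bool := true :: List.replicate S' false

def pvNewEntry (x : Int) (r : List Bool) (j : Int) : Bool :=
  if x > j then PySem.List.pyGetD r j false
  else PySem.List.pyGetD r j false || PySem.List.pyGetD r (j - x) false

def pvStepRow (S' : Nat) (x : Int) (r : List Bool) : List Bool :=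
  (List.range (S'+1)).map (fun (jn : Nat) => if jn = 0 then true else pvNewEntry x r (jn : Int))

def pvPartial (S' t : Nat) (x : Int) (r : List Bool) : List Bool :=
  (List.range (S'+1)).map (fun (jn : Nat) =>
    if jn = 0 then true else if jn ≤ t then pvNewEntry x r (jn : Int) else false)

def pvSums (l : List Int) : PySem.Set Int := l.foldl pvUpd (PySem.Set.ofList [0])

def pvRowOf (S' : Nat) (s : PySem.Set Int) : List Bool :=
  (List.range (S'+1)).map (fun (jn : Nat) => decide ((jn : Int) ∈ s))

def pvRows (S' : Nat) (l : List Int) : List Bool :=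
  l.foldl (fun r x => pvStepRow S' x r) (pvRow0 S')

def pvTab (S' N : Nat) (arr : List Int) (m : Nat) : List (List Bool) :=
  (List.range (N+1)).map (fun k => if k ≤ m then pvRows S' (arr.take k) else pvRow0 S')

-- small list facts
theorem pv_getD_set_self {α : Type} (T : List α) (i : Nat) (a d : α) (h : i < T.length) :
    (T.set i a).getD i d = a := by
  simp [List.getD_eq_getElem?_getD, h]

theorem pv_getD_set_ne {α : Type} (T : List α) (i k : Nat) (a d : α) (h : i ≠ k) :
    (T.set i a).getD k d = T.getD k d := by
  simp [List.getD_eq_getElem?_getD, h]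

theorem pv_set_getD_self {α : Type} (T : List α) (i : Nat) (d : α) (h : i < T.length) :
    T.set i (T.getD i d) = T := by
  apply List.ext_getElem (by simp)
  intro k hk1 hk2
  rw [List.getElem_set]
  split
  · next he =>
    subst he
    rw [List.getD_eq_getElem?_getD, List.getElem?_eq_getElem h]
    rfl
  · rfl

theorem pv_getD_map_range {β : Type} (f : Nat → β) (m k : Nat) (d : β) (hk : k < m) :
    ((List.range m).map f).getD k d = f k := by
  rw [List.getD_eq_getElem?_getD]
  simp [hk]

-- B-side set invariants
theorem pv_zero_mem_foldl (l : List Int) (s : PySem.Set Int) (h : (0:Int) ∈ s) :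
    (0:Int) ∈ l.foldl pvUpd s := by
  induction l generalizing s with
  | nil => exact h
  | cons x l ih =>
    refine ih _ ?_
    unfold pvUpd
    exact (PySem.Set.mem_union _ _ _).2 (Or.inl h)

theorem pv_contains_eq_decide (s : PySem.Set Int) (x : Int) :
    PySem.Set.contains s x = decide (x ∈ s) := by
  by_cases h : x ∈ s <;> simp [h]

theorem pv_row0_map (S' : Nat) :
    pvRow0 S' = (List.range (S'+1)).map (fun jn => if jn = 0 then true else false) := by
  apply List.ext_getElem (by simp [pvRow0])
  intro k h1 h2
  simp only [List.getElem_map, List.getElem_range]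
  cases k with
  | zero => rfl
  | succ k => simp [pvRow0]

theorem pv_row0_eq (S' : Nat) : pvRow0 S' = pvRowOf S' (PySem.Set.ofList [0]) := by
  rw [pv_row0_map]
  unfold pvRowOf
  apply List.map_congr_left
  intro j _
  by_cases h : j = 0
  · subst h; simp [PySem.Set.mem_ofList]
  · simp [PySem.Set.mem_ofList, h]

theorem pv_step_corr (S' : Nat) (x : Int) (hx : 0 ≤ x) (s : PySem.Set Int)
    (hs : ∀ t ∈ s, (0:Int) ≤ t) (h0 : (0:Int) ∈ s) :
    pvStepRow S' x (pvRowOf S' s) = pvRowOf S' (pvUpd s x) := by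
  unfold pvStepRow pvRowOf
  apply List.map_congr_left
  intro j hj
  have hjlt : j < S'+1 := List.mem_range.1 hj
  have hget : ∀ k : Nat, k < S'+1 →
      PySem.List.pyGetD ((List.range (S'+1)).map (fun (jn : Nat) => decide ((jn:Int) ∈ s))) (k:Int) false
        = decide ((k:Int) ∈ s) := by
    intro k hk
    rw [PySem.List.pyGetD_natCast, pv_getD_map_range _ _ _ _ hk]
  by_cases hj0 : j = 0
  · subst hj0
    have : (0:Int) ∈ pvUpd s x := by
      unfold pvUpd
      exact (PySem.Set.mem_union _ _ _).2 (Or.inl h0)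
    simp [this]
  · rw [if_neg hj0]
    unfold pvNewEntry
    by_cases hxj : x > (j:Int)
    · rw [if_pos hxj, hget j hjlt]
      refine decide_eq_decide.mpr ?_
      unfold pvUpd
      rw [PySem.Set.mem_union]
      constructor
      · exact Or.inl
      · rintro (h | h)
        · exact h
        · exfalso
          rcases List.mem_map.1 ((PySem.Set.mem_ofList _ _).1 h) with ⟨u, hu, huv⟩
          have := hs u hu
          omega
    · rw [if_neg hxj, hget j hjlt]
      have hxle : x ≤ (j:Int) := by omega
      have hxt : (x.toNat : Int) = x := Int.toNat_of_nonneg hx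
      have hcast : ((j:Int) - x) = ((j - x.toNat : Nat) : Int) := by
        have : x.toNat ≤ j := by omega
        push_cast [this]
        omega
      rw [hcast, hget (j - x.toNat) (by omega)]
      have hiff : ((j:Int) ∈ pvUpd s x) ↔
          (((j:Int) ∈ s) ∨ (((j - x.toNat : Nat) : Int) ∈ s)) := by
        unfold pvUpd
        rw [PySem.Set.mem_union]
        constructor
        · rintro (h | h)
          · exact Or.inl h
          · rcases List.mem_map.1 ((PySem.Set.mem_ofList _ _).1 h) with ⟨u, hu, huv⟩
            refine Or.inr ?_
            have : u = ((j - x.toNat : Nat) : Int) := by omega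
            rwa [this] at hu
        · rintro (h | h)
          · exact Or.inl h
          · refine Or.inr ((PySem.Set.mem_ofList _ _).2
              (List.mem_map.2 ⟨((j - x.toNat : Nat) : Int), h, ?_⟩))
            omega
      by_cases h1 : ((j:Int) ∈ s) <;> by_cases h2 : (((j - x.toNat : Nat) : Int) ∈ s) <;>
        simp [h1, h2, hiff]

theorem pv_corr (S' : Nat) (l : List Int) (s : PySem.Set Int)
    (hl : ∀ x ∈ l, (0:Int) ≤ x) (hs : ∀ t ∈ s, (0:Int) ≤ t) (h0 : (0:Int) ∈ s) :
    l.foldl (fun r x => pvStepRow S' x r) (pvRowOf S' s) = pvRowOf S' (l.foldl pvUpd s) := by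
  induction l generalizing s with
  | nil => rfl
  | cons x l ih =>
    have hx := hl x List.mem_cons_self
    simp only [List.foldl_cons]
    rw [pv_step_corr S' x hx s hs h0]
    refine ih _ (fun y hy => hl y (List.mem_cons_of_mem _ hy)) ?_ ?_
    · intro t ht
      unfold pvUpd at ht
      rcases (PySem.Set.mem_union _ _ _).1 ht with h | h
      · exact hs t h
      · rcases List.mem_map.1 ((PySem.Set.mem_ofList _ _).1 h) with ⟨u, hu, rfl⟩
        have := hs u hu
        omega
    · unfold pvUpd
      exact (PySem.Set.mem_union _ _ _).2 (Or.inl h0)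

-- A-side: the initial table
theorem pv_rowbuild (S' : Nat) (i : Int) :
    (PySem.List.pyRange 0 ((S' : Int)+1)).foldl (fun row j =>
      if j = 0 then row ++ [true]
      else if i = 0 then row ++ [false]
      else row ++ [false]) [] = pvRow0 S' := by
  have hfun : (fun (row : List Bool) (j : Int) =>
      if j = 0 then row ++ [true] else if i = 0 then row ++ [false] else row ++ [false])
      = fun row j => row ++ [if j = 0 then true else false] := by
    funext row j
    split_ifs <;> rfl
  rw [hfun, PySem.List.foldl_append_singleton_eq_map]
  have hc : ((S':Int)+1) = ((S'+1 : Nat) : Int) := by push_cast; ring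
  rw [hc, PySem.List.pyRange_zero_natCast, List.map_map, List.nil_append, pv_row0_map]
  apply List.map_congr_left
  intro j _
  by_cases h : j = 0
  · subst h; simp
  · simp [Function.comp, h]

theorem pv_initTab (N S' : Nat) :
    (PySem.List.pyRange 0 ((N : Int)+1)).foldl (fun T i =>
      T ++ [(PySem.List.pyRange 0 ((S' : Int)+1)).foldl (fun row j =>
        if j = 0 then row ++ [true]
        else if i = 0 then row ++ [false]
        else row ++ [false]) []]) [] = List.replicate (N+1) (pvRow0 S') := by
  have hfun : (fun (T : List (List Bool)) (i : Int) =>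
      T ++ [(PySem.List.pyRange 0 ((S' : Int)+1)).foldl (fun row j =>
        if j = 0 then row ++ [true]
        else if i = 0 then row ++ [false]
        else row ++ [false]) []])
      = fun T _ => T ++ [pvRow0 S'] := by
    funext T i
    rw [pv_rowbuild]
  rw [hfun, PySem.List.foldl_append_singleton_eq_map (f := fun _ => pvRow0 S'), List.nil_append]
  refine List.eq_replicate_iff.mpr ⟨?_, ?_⟩
  · rw [List.length_map, PySem.List.length_pyRange_one]
    omega
  · intro b hb
    rcases List.mem_map.1 hb with ⟨_, _, rfl⟩
    rfl

theorem pv_partial_zero (S' : Nat) (x : Int) (r : List Bool) :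
    pvPartial S' 0 x r = pvRow0 S' := by
  unfold pvPartial
  rw [pv_row0_map]
  apply List.map_congr_left
  intro j _
  by_cases h : j = 0 <;> simp [h]

theorem pv_partial_set (S' t : Nat) (x : Int) (r : List Bool) (_ht : t + 1 ≤ S') :
    (pvPartial S' t x r).set (t+1) (pvNewEntry x r ((t:Int)+1)) = pvPartial S' (t+1) x r := by
  apply List.ext_getElem (by simp [pvPartial])
  intro k hk1 hk2
  rw [List.getElem_set]
  have hk : k < S'+1 := by simpa [pvPartial] using hk2
  simp only [pvPartial, List.getElem_map, List.getElem_range]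
  have hct : ((t:Int)+1) = ((t+1 : Nat) : Int) := by push_cast; ring
  split
  · next he =>
    rw [← he, hct]
    simp
  · next hne =>
    split_ifs <;> first | rfl | omega

theorem pv_partial_last (S' : Nat) (x : Int) (r : List Bool) :
    pvPartial S' S' x r = pvStepRow S' x r := by
  unfold pvPartial pvStepRow
  apply List.map_congr_left
  intro j hj
  have hjle : j ≤ S' := by have := List.mem_range.1 hj; omega
  by_cases h : j = 0 <;> simp [h, hjle]

theorem pv_innerFold (S' : Nat) (x : Int) (iN : Nat) (T : List (List Bool)) (r : List Bool)
    (hiL : iN < T.length) (h1 : 1 ≤ iN)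
    (hprev : T.getD (iN-1) [] = r) (hcur : T.getD iN [] = pvRow0 S') :
    (PySem.List.pyRange 1 ((S' : Int)+1)).foldl
      (fun T j => if x > j then pvSet2 T (iN : Int) j (pvGet2 T ((iN : Int)-1) j)
                  else pvSet2 T (iN : Int) j (pvGet2 T ((iN : Int)-1) j || pvGet2 T ((iN : Int)-1) (j - x))) T
    = T.set iN (pvStepRow S' x r) := by
  have key : ∀ t : Nat, t ≤ S' →
      (PySem.List.pyRange 1 ((t : Int)+1)).foldl
        (fun T j => if x > j then pvSet2 T (iN : Int) j (pvGet2 T ((iN : Int)-1) j)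
                    else pvSet2 T (iN : Int) j (pvGet2 T ((iN : Int)-1) j || pvGet2 T ((iN : Int)-1) (j - x))) T
      = T.set iN (pvPartial S' t x r) := by
    intro t
    induction t with
    | zero =>
      intro _
      rw [PySem.List.pyRange_one_eq_nil (by norm_num), List.foldl_nil, pv_partial_zero, ← hcur,
        pv_set_getD_self _ _ _ hiL]
    | succ t ih =>
      intro hts
      have hts' : t ≤ S' := by omega
      have hstep : (((t+1 : Nat)) : Int) + 1 = (((t : Nat) : Int) + 1) + 1 := by push_cast; ring
      rw [hstep, PySem.List.pyRange_one_succ_right (by omega), List.foldl_append, ih hts']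
      simp only [List.foldl_cons, List.foldl_nil]
      set P := pvPartial S' t x r with hP
      have hgprev : pvGet2 (T.set iN P) ((iN : Int) - 1) = fun j => PySem.List.pyGetD r j false := by
        funext j
        unfold pvGet2
        have hc : ((iN : Int) - 1) = ((iN - 1 : Nat) : Int) := by omega
        rw [hc, PySem.List.pyGetD_natCast, pv_getD_set_ne _ _ _ _ _ (by omega), hprev]
      have hgcur : PySem.List.pyGetD (T.set iN P) (iN : Int) [] = P := by
        rw [PySem.List.pyGetD_natCast, pv_getD_set_self _ _ _ _ hiL]
      have hct : ((t:Int)+1) = ((t+1 : Nat) : Int) := by push_cast; ring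
      have hset : ∀ v : Bool, pvSet2 (T.set iN P) (iN : Int) ((t : Int)+1) v
          = T.set iN (P.set (t+1) v) := by
        intro v
        unfold pvSet2
        rw [hgcur, hct, Int.toNat_natCast, Int.toNat_natCast, List.set_set]
      simp only [hgprev]
      rw [show (if x > ((t:Int)+1) then pvSet2 (T.set iN P) (iN:Int) ((t:Int)+1) (PySem.List.pyGetD r ((t:Int)+1) false)
         else pvSet2 (T.set iN P) (iN:Int) ((t:Int)+1) (PySem.List.pyGetD r ((t:Int)+1) false || PySem.List.pyGetD r (((t:Int)+1) - x) false))
        = pvSet2 (T.set iN P) (iN:Int) ((t:Int)+1) (pvNewEntry x r ((t:Int)+1)) from by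
          unfold pvNewEntry
          split_ifs <;> rfl]
      rw [hset, pv_partial_set S' t x r (by omega)]
  have h2 := key S' le_rfl
  rwa [pv_partial_last] at h2

theorem pv_getD_tab (S' N : Nat) (arr : List Int) (m k : Nat) (hk : k < N+1) :
    (pvTab S' N arr m).getD k [] = if k ≤ m then pvRows S' (arr.take k) else pvRow0 S' := by
  unfold pvTab
  rw [List.getD_eq_getElem?_getD]
  simp [hk]

theorem pv_tab_zero (S' N : Nat) (arr : List Int) :
    pvTab S' N arr 0 = List.replicate (N+1) (pvRow0 S') := by
  unfold pvTab
  refine List.eq_replicate_iff.mpr ⟨by simp, ?_⟩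
  intro b hb
  rcases List.mem_map.1 hb with ⟨k, _, rfl⟩
  by_cases h : k = 0
  · subst h
    simp [pvRows]
  · simp [h]

theorem pv_outerFold (arr : List Int) (N S' : Nat) (hNlen : N ≤ arr.length)
    (m : Nat) (hm : m ≤ N) :
    (PySem.List.pyRange 1 ((m : Int)+1)).foldl (fun T i =>
      (PySem.List.pyRange 1 ((S' : Int)+1)).foldl (fun T j =>
        if PySem.List.pyGetD arr (i-1) 0 > j then
          pvSet2 T i j (pvGet2 T (i-1) j)
        else
          pvSet2 T i j (pvGet2 T (i-1) j || pvGet2 T (i-1) (j - PySem.List.pyGetD arr (i-1) 0))) T)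
      (List.replicate (N+1) (pvRow0 S'))
    = pvTab S' N arr m := by
  induction m with
  | zero =>
    have hz : PySem.List.pyRange (1:Int) (((0:Nat):Int)+1) = [] :=
      PySem.List.pyRange_one_eq_nil (by norm_num)
    rw [hz, List.foldl_nil, pv_tab_zero]
  | succ m ih =>
    have hm' : m ≤ N := by omega
    have hstep : (((m+1 : Nat)) : Int) + 1 = (((m : Nat) : Int) + 1) + 1 := by push_cast; ring
    rw [hstep, PySem.List.pyRange_one_succ_right (a := 1) (b := ((m:Int) + 1)) (by omega),
      List.foldl_append, ih hm']
    simp only [List.foldl_cons, List.foldl_nil]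
    have hi : ((m : Int) + 1) = ((m+1 : Nat) : Int) := by push_cast; ring
    rw [hi]
    have hmlt : m < arr.length := by omega
    have hx : PySem.List.pyGetD arr (((m+1 : Nat) : Int) - 1) 0 = arr.getD m 0 := by
      have hc : (((m+1 : Nat) : Int) - 1) = ((m : Nat) : Int) := by push_cast; ring
      rw [hc, PySem.List.pyGetD_natCast]
    rw [hx]
    rw [pv_innerFold S' (arr.getD m 0) (m+1) (pvTab S' N arr m) (pvRows S' (arr.take m))
      (by simp [pvTab]; omega) (by omega)
      (by simpa using pv_getD_tab S' N arr m m (by omega))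
      (by rw [pv_getD_tab S' N arr m (m+1) (by omega)]; simp)]
    have hrow : pvStepRow S' (arr.getD m 0) (pvRows S' (arr.take m)) = pvRows S' (arr.take (m+1)) := by
      have hgd : arr.getD m 0 = arr[m] := by
        rw [List.getD_eq_getElem?_getD, List.getElem?_eq_getElem hmlt]
        rfl
      rw [List.take_add_one, List.getElem?_eq_getElem hmlt]
      unfold pvRows
      rw [Option.toList_some, List.foldl_append]
      simp only [List.foldl_cons, List.foldl_nil]
      rw [hgd]
    rw [hrow]
    apply List.ext_getElem (by simp [pvTab])
    intro k hk1 hk2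
    rw [List.getElem_set]
    simp only [pvTab, List.getElem_map, List.getElem_range]
    split
    · next he =>
      rw [← he]
      simp
    · next hne =>
      split_ifs <;> first | rfl | omega

theorem pv_getD_map_const {α β : Type} (c : α) (L : List β) (k : Nat) (hk : k < L.length) (d : α) :
    (List.map (fun _ => c) L).getD k d = c := by
  rw [List.getD_eq_getElem?_getD]
  simp [hk]

theorem pv_easyNeg (arr : List Int) (n : Int) (h0 : 0 ≤ n) (hS : arr.sum + 1 ≤ 0) :
    get_subset arr n = get_subset_alt arr n := by
  have hA : get_subset arr n = [] := by
    simp only [get_subset]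
    rw [PySem.List.pyRange_one_eq_nil (show arr.sum + 1 ≤ 0 from hS),
      PySem.List.pyRange_one_eq_nil (show arr.sum + 1 ≤ 1 by omega)]
    simp only [List.foldl_nil]
    rw [PySem.List.foldl_ignore,
      PySem.List.foldl_append_singleton_eq_map (f := fun _ => ([] : List Bool)), List.nil_append,
      PySem.List.pyGetD_of_nonneg _ _ h0,
      pv_getD_map_const _ _ _ (by rw [PySem.List.length_pyRange_one]; omega)]
  have hB : get_subset_alt arr n = [] := by
    simp only [get_subset_alt]
    rw [PySem.List.pyRange_one_eq_nil (show arr.sum + 1 ≤ 0 from hS)]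
    rfl
  rw [hA, hB]

theorem pv_easyZero (arr : List Int) (n : Int) (h0 : 0 ≤ n) (hS : arr.sum = 0) :
    get_subset arr n = get_subset_alt arr n := by
  obtain ⟨N, hN⟩ : ∃ N : Nat, (N : Int) = n := ⟨n.toNat, Int.toNat_of_nonneg h0⟩
  subst hN
  have hsum : arr.sum + 1 = ((0:Nat):Int) + 1 := by rw [hS]; norm_num
  have hz : PySem.List.pyRange (1:Int) (((0:Nat):Int)+1) = [] :=
    PySem.List.pyRange_one_eq_nil (by norm_num)
  have hA : get_subset arr (N : Int) = [true] := by
    simp only [get_subset]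
    rw [hsum, pv_initTab N 0, hz]
    simp only [List.foldl_nil]
    rw [PySem.List.foldl_ignore, PySem.List.pyGetD_natCast]
    simp [List.getD_eq_getElem?_getD, pvRow0]
  have hB : get_subset_alt arr (N : Int) = [true] := by
    simp only [get_subset_alt]
    have hr01 : PySem.List.pyRange (0:Int) (arr.sum+1) = [0] := by rw [hS]; decide
    rw [hr01, PySem.List.slice_to_natCast arr N, List.map_cons, List.map_nil,
      pv_contains_eq_decide]
    have hmem : (0:Int) ∈ (List.take N arr).foldl pvUpd (PySem.Set.ofList [0]) := by
      apply pv_zero_mem_foldl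
      simp [PySem.Set.mem_ofList]
    simp [hmem]
  rw [hA, hB]

theorem pv_main (arr : List Int) (n : Int) (h0 : 0 ≤ n) (hlen : n ≤ (arr.length : Int))
    (hpos : ∀ x ∈ arr, (0:Int) ≤ x) :
    get_subset arr n = get_subset_alt arr n := by
  obtain ⟨N, hN⟩ : ∃ N : Nat, (N : Int) = n := ⟨n.toNat, Int.toNat_of_nonneg h0⟩
  subst hN
  have hSnn : 0 ≤ arr.sum := List.sum_nonneg hpos
  obtain ⟨S', hS'⟩ : ∃ S' : Nat, (S' : Int) = arr.sum := ⟨arr.sum.toNat, Int.toNat_of_nonneg hSnn⟩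
  have hNlen : N ≤ arr.length := by exact_mod_cast hlen
  simp only [get_subset, get_subset_alt]
  rw [← hS']
  rw [pv_initTab N S', pv_outerFold arr N S' hNlen N le_rfl, PySem.List.pyGetD_natCast,
    pv_getD_tab S' N arr N N (by omega), if_pos le_rfl]
  rw [PySem.List.slice_to_natCast arr N]
  have hrows : pvRows S' (arr.take N)
      = pvRowOf S' ((arr.take N).foldl pvUpd (PySem.Set.ofList [0])) := by
    unfold pvRows
    rw [pv_row0_eq]
    refine pv_corr S' (arr.take N) (PySem.Set.ofList [0])
      (fun x hx => hpos x (List.mem_of_mem_take hx)) ?_ ?_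
    · intro t ht
      rcases (PySem.Set.mem_ofList _ _).1 ht with h
      simp only [List.mem_singleton] at h
      omega
    · simp [PySem.Set.mem_ofList]
  rw [hrows]
  unfold pvRowOf
  have hc : ((S':Int)+1) = ((S'+1 : Nat) : Int) := by push_cast; ring
  rw [hc, PySem.List.pyRange_zero_natCast, List.map_map]
  apply List.map_congr_left
  intro k _
  simp [Function.comp]

-- ===== VERDICT (by name: the statement is the Claim_ definition above) =====
theorem get_subset_spec : Claim_equal_get_subset := by
  intro arr n _ hPre
  unfold Spec_get_subset
  rcases hPre with ⟨h0, hcase⟩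
  rcases hcase with hS | ⟨hlen, hpos⟩
  · rcases lt_or_eq_of_le hS with hS' | hS'
    · exact pv_easyNeg arr n h0 (by omega)
    · exact pv_easyZero arr n h0 hS'
  · exact pv_main arr n h0 hlen hpos
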